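-- pv_equiv track=rewrite | github.com/Ramkumar2529/HackerEarth | Negotiation.py | solve
-- ===== SOURCE A (Python) =====
-- import bisect
--
-- def solve (a, c, M, N, X):
--     for i in c:
--         if(i<=X):
--             bisect.insort(a,i)
--     s=0
--     i=0
--     while(s<=X):
--         s=s+a[i]
--         i+=1
--     return(i-1)
-- ===== SOURCE B (Python) =====
-- def _insert(xs, x):
--     # insert x at its bisect-right position, by divide and conquer on slices
--     if not xs:
--         return [x]
--     mid = len(xs) // 2
--     if x < xs[mid]:
--         return _insert(xs[:mid], x) + xs[mid:]
--     return xs[:mid + 1] + _insert(xs[mid + 1:], x)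
--
-- def _steps(xs, X, s):
--     # number of elements consumed until the running sum exceeds X
--     if s > X:
--         return 0
--     return 1 + _steps(xs[1:], X, s + xs[0])
--
-- def solve(a, c, M, N, X):
--     merged = list(a)
--     for v in c:
--         if v <= X:
--             merged = _insert(merged, v)
--     return _steps(merged, X, 0) - 1
-- ===== Notes on version B (the rewrite author's own statement) =====
-- stated objective: alternative
-- what changed: B replaces the in-place library bisect.insort loop by a pure divide-and-conquer slice insertion (no mutation of a) and the indexed while-loop by a recursive prefix-consumer that counts elements until the running sum exceeds X.
import Mathlib
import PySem

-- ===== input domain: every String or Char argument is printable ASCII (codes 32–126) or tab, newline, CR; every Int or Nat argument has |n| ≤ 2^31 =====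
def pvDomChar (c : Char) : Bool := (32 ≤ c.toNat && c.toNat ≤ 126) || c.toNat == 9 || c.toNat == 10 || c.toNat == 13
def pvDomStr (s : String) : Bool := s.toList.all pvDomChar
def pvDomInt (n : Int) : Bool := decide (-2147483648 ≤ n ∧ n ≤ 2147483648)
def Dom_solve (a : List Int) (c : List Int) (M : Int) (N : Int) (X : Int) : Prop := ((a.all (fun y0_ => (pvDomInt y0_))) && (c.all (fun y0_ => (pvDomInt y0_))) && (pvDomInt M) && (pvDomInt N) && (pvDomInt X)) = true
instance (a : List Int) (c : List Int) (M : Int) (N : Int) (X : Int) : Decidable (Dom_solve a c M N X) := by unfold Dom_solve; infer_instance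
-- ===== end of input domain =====

-- B replaces A's in-place bisect.insort loop by a pure divide-and-conquer slice insertion and
-- A's indexed while-loop by a recursive prefix consumer (alternative decomposition, same cost).
-- A mutates its argument `a` in place (bisect.insort); B does not — the equivalence proved here
-- is about the RETURN value only.

-- ===== PORT A =====
-- bisect.insort's binary search: while lo < hi: mid=(lo+hi)//2; if x < a[mid]: hi=mid else lo=mid+1
-- (a[mid] is always in range since lo ≤ mid < hi ≤ len a, so getD is exact here)
def bisectLoop (xs : List Int) (x : Int) (lo hi : Nat) : Nat :=
  if lo < hi then
    if x < xs.getD ((lo + hi) / 2) 0 then bisectLoop xs x lo ((lo + hi) / 2)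
    else bisectLoop xs x ((lo + hi) / 2 + 1) hi
  else lo
termination_by hi - lo
decreasing_by all_goals omega

-- bisect.insort(a, i): insert at the position found by the binary search
def insortA (xs : List Int) (x : Int) : List Int :=
  let p := bisectLoop xs x 0 xs.length
  xs.take p ++ x :: xs.drop p

-- while s <= X: s = s + a[i]; i += 1   (a[i] out of range = IndexError, excluded by Pre_solve)
def whileA (L : List Int) (X : Int) (s : Int) (i : Nat) : Int :=
  if s ≤ X then
    if h : i < L.length then whileA L X (s + L[i]) (i + 1)
    else 0  -- Python raises IndexError here; these inputs are outside Pre_solve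
  else (i : Int) - 1
termination_by L.length - i
decreasing_by omega

def solve (a : List Int) (c : List Int) (M : Int) (N : Int) (X : Int) : Int :=
  whileA (c.foldl (fun m i => if i ≤ X then insortA m i else m) a) X 0 0

-- ===== PORT B =====
-- _insert: insert x by divide and conquer on slices (xs[mid] always in range: len//2 < len)
def insertB (xs : List Int) (x : Int) : List Int :=
  if hn : xs = [] then [x]
  else
    if x < xs.getD (xs.length / 2) 0 then
      insertB (xs.take (xs.length / 2)) x ++ xs.drop (xs.length / 2)
    else
      xs.take (xs.length / 2 + 1) ++ insertB (xs.drop (xs.length / 2 + 1)) x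
termination_by xs.length
decreasing_by
  all_goals have hl : 0 < xs.length := List.length_pos_of_ne_nil hn
  · simp [List.length_take]; omega
  · simp [List.length_drop]; omega

-- _steps: number of elements consumed until the running sum exceeds X
def stepsB (xs : List Int) (X : Int) (s : Int) : Int :=
  if s > X then 0
  else
    match xs with
    | [] => 0  -- Python raises IndexError (xs[0]) here; these inputs are outside Pre_solve
    | h :: t => 1 + stepsB t X (s + h)

-- merged = a with every v in c with v <= X inserted in order
def pvMerged (a : List Int) (c : List Int) (X : Int) : List Int :=
  c.foldl (fun m v => if v ≤ X then insertB m v else m) a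

def solve_alt (a : List Int) (c : List Int) (M : Int) (N : Int) (X : Int) : Int :=
  stepsB (pvMerged a c X) X 0 - 1

-- ===== PRECONDITION & SPEC =====
-- Exactly the inputs on which A returns: some prefix (possibly empty, when X < 0) of the merged
-- sequence sums above X; otherwise A's while loop runs off the end and raises IndexError.
def Pre_solve (a : List Int) (c : List Int) (M : Int) (N : Int) (X : Int) : Prop :=
  ∃ k ∈ Finset.range ((pvMerged a c X).length + 1), ((pvMerged a c X).take k).sum > X
instance (a : List Int) (c : List Int) (M : Int) (N : Int) (X : Int) : Decidable (Pre_solve a c M N X) := by unfold Pre_solve; infer_instance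

def pvWitness_solve : List Int × List Int × Int × Int × Int := ([1], [1], 0, 0, 0)

def Spec_solve (a : List Int) (c : List Int) (M : Int) (N : Int) (X : Int) (out : Int) : Prop := out = solve_alt a c M N X
instance (a : List Int) (c : List Int) (M : Int) (N : Int) (X : Int) (out : Int) : Decidable (Spec_solve a c M N X out) := by unfold Spec_solve; infer_instance

-- ===== CLAIM (what is proved, stated in full; the proofs are below) =====
def Claim_equal_solve : Prop := ∀ (a : List Int) (c : List Int) (M : Int) (N : Int) (X : Int), Dom_solve a c M N X → Pre_solve a c M N X → Spec_solve a c M N X (solve a c M N X)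

-- ===== LEMMAS AND PROOFS =====

-- The divide-and-conquer insertion equals "insert at the bisect position", segment by segment.
theorem insertB_bisect (x : Int) : ∀ (n : Nat) (xs : List Int) (lo hi : Nat),
    hi - lo ≤ n → lo ≤ hi → hi ≤ xs.length →
    xs.take lo ++ insertB ((xs.drop lo).take (hi - lo)) x ++ xs.drop hi
      = xs.take (bisectLoop xs x lo hi) ++ x :: xs.drop (bisectLoop xs x lo hi) := by
  intro n
  induction n with
  | zero =>
    intro xs lo hi hn hlh hhl
    have he : lo = hi := by omega
    subst he
    rw [bisectLoop]
    simp [insertB]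
  | succ n ih =>
    intro xs lo hi hn hlh hhl
    by_cases hlt : lo < hi
    case neg =>
      have he : lo = hi := by omega
      subst he
      rw [bisectLoop]
      simp [insertB]
    case pos =>
    set seg := (xs.drop lo).take (hi - lo) with hseg
    have hlen : seg.length = hi - lo := by
      rw [hseg, List.length_take, List.length_drop]
      omega
    have hne : seg ≠ [] := by
      intro h0
      have h00 : seg.length = 0 := by rw [h0]; rfl
      omega
    have hmidlt : (lo + hi) / 2 < hi := by omega
    have hmidge : lo ≤ (lo + hi) / 2 := by omega
    have hmid : (hi - lo) / 2 = (lo + hi) / 2 - lo := by omega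
    have hgetd : seg.getD ((hi - lo) / 2) 0 = xs.getD ((lo + hi) / 2) 0 := by
      rw [List.getD_eq_getElem?_getD, List.getD_eq_getElem?_getD, hseg]
      rw [List.getElem?_take_of_lt (by omega : (hi - lo) / 2 < hi - lo)]
      rw [List.getElem?_drop]
      have : lo + (hi - lo) / 2 = (lo + hi) / 2 := by omega
      rw [this]
    rw [bisectLoop, if_pos hlt]
    rw [insertB.eq_def, dif_neg hne, hlen, hgetd]
    by_cases hc : x < xs.getD ((lo + hi) / 2) 0
    · rw [if_pos hc, if_pos hc]
      have h1 : seg.take ((hi - lo) / 2) = (xs.drop lo).take ((lo + hi) / 2 - lo) := by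
        rw [hseg, List.take_take]
        congr 1
        omega
      have h2 : seg.drop ((hi - lo) / 2) ++ xs.drop hi = xs.drop ((lo + hi) / 2) := by
        have e1 : (xs.drop lo).drop ((hi - lo) / 2) = xs.drop ((lo + hi) / 2) := by
          rw [List.drop_drop]
          congr 1
          omega
        have e3 : xs.drop hi = (xs.drop ((lo + hi) / 2)).drop (hi - (lo + hi) / 2) := by
          rw [List.drop_drop]
          congr 1
          omega
        rw [hseg, List.drop_take, e1, e3]
        have : hi - lo - (hi - lo) / 2 = hi - (lo + hi) / 2 := by omega
        rw [this, List.take_append_drop]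
      have hih := ih xs lo ((lo + hi) / 2) (by omega) (by omega) (by omega)
      rw [h1] at *
      simp only [List.append_assoc] at hih ⊢
      rw [h2]
      exact hih
    · rw [if_neg hc, if_neg hc]
      have h1 : xs.take lo ++ seg.take ((hi - lo) / 2 + 1) = xs.take ((lo + hi) / 2 + 1) := by
        rw [hseg, List.take_take]
        have : min ((hi - lo) / 2 + 1) (hi - lo) = (lo + hi) / 2 + 1 - lo := by omega
        rw [this, ← List.take_add]
        congr 1
        omega
      have h2 : seg.drop ((hi - lo) / 2 + 1) = (xs.drop ((lo + hi) / 2 + 1)).take (hi - ((lo + hi) / 2 + 1)) := by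
        rw [hseg, List.drop_take, List.drop_drop]
        congr 1
        · omega
        · congr 1
          omega
      have hih := ih xs ((lo + hi) / 2 + 1) hi (by omega) (by omega) (by omega)
      rw [h2]
      simp only [List.append_assoc] at hih ⊢
      rw [← List.append_assoc, h1]
      exact hih

theorem insertB_eq_insortA (xs : List Int) (x : Int) : insertB xs x = insortA xs x := by
  have h := insertB_bisect x xs.length xs 0 xs.length (by omega) (by omega) (le_refl _)
  simp at h
  rw [insortA]
  exact h

theorem merged_eq (a c : List Int) (X : Int) :
    c.foldl (fun m i => if i ≤ X then insortA m i else m) a = pvMerged a c X := by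
  rw [pvMerged]
  congr 1
  funext m v
  by_cases h : v ≤ X <;> simp [h, insertB_eq_insortA]

theorem whileA_eq_stepsB (L : List Int) (X : Int) : ∀ (n i : Nat) (s : Int),
    L.length - i ≤ n →
    (∃ k, k ≤ (L.drop i).length ∧ s + ((L.drop i).take k).sum > X) →
    whileA L X s i = (i : Int) + stepsB (L.drop i) X s - 1 := by
  intro n
  induction n with
  | zero =>
    intro i s hb ⟨k, hk, hsum⟩
    have hd : L.drop i = [] := List.drop_eq_nil_of_le (by omega)
    rw [hd] at hk hsum ⊢
    simp at hk
    subst hk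
    simp at hsum
    rw [whileA, stepsB]
    simp [hsum, not_le.mpr hsum]
  | succ n ih =>
    intro i s hb ⟨k, hk, hsum⟩
    by_cases hs : s ≤ X
    · have hk1 : 1 ≤ k := by
        by_contra h
        have : k = 0 := by omega
        subst this
        simp at hsum
        omega
      have hlt : i < L.length := by
        have := List.length_drop (l := L) (i := i)
        omega
      have hcons : L.drop i = L[i] :: L.drop (i + 1) := List.drop_eq_getElem_cons hlt
      rw [whileA]
      simp only [hs, if_pos, hlt, dif_pos]
      rw [hcons, stepsB]
      simp only [not_lt.mpr hs, if_false]
      have hrec := ih (i + 1) (s + L[i]) (by omega) ?_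
      · rw [hrec]
        push_cast
        ring
      · refine ⟨k - 1, ?_, ?_⟩
        · have := List.length_drop (l := L) (i := i + 1)
          have := List.length_drop (l := L) (i := i)
          omega
        · have : (L.drop i).take k = L[i] :: (L.drop (i + 1)).take (k - 1) := by
            rw [hcons]
            have : k = (k - 1) + 1 := by omega
            rw [this, List.take_succ_cons]
            rfl
          rw [this] at hsum
          simp [List.sum_cons] at hsum
          omega
    · rw [whileA, stepsB.eq_def]
      simp [hs, not_le.mp hs]

-- ===== VERDICT (by name: the statement is the Claim_ definition above) =====
theorem solve_spec : Claim_equal_solve := by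
  intro a c M N X _ hPre
  unfold Spec_solve solve solve_alt
  rw [merged_eq]
  obtain ⟨k, hk, hsum⟩ := hPre
  rw [Finset.mem_range] at hk
  have h := whileA_eq_stepsB (pvMerged a c X) X (pvMerged a c X).length 0 0 (by omega)
    ⟨k, by simpa using (by omega : k ≤ (pvMerged a c X).length), by simpa using hsum⟩
  simpa using h
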